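-- pv_equiv track=rewrite | github.com/KaiDavidF/IntegerProgramming | visualization/plottinglattice.py | compute_generated_set
-- ===== SOURCE A (Python) =====
-- from collections import deque
--
-- def compute_generated_set(b, periodic_vectors, max_val=30, set_type='semilinear'):
--     """
--     Computes the set S = b + (combination of periodic vectors) intersected with [0, max_val-1]^2.
--
--     If set_type == 'semilinear', S is defined as:
--         S = { b + n1*p1 + ... + nk*pk  |  n_i in ℕ }
--     (only nonnegative combinations).
--
--     If set_type == 'lattice', S is defined as:
--         S = { b + n1*p1 + ... + nk*pk  |  n_i in ℤ }
--     (all integer combinations).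
--
--     Parameters:
--       b: tuple (x, y) for the base point.
--       periodic_vectors: list of tuples, each a periodic vector.
--       max_val: size of the grid (default 30 gives points 0,...,29 in each coordinate).
--       set_type: either 'semilinear' or 'lattice'
--
--     Returns:
--       A set of tuples (x, y) that lie in the grid.
--     """
--     points = set()
--     q = deque()
--
--     # Determine allowed moves.
--     if set_type == 'semilinear':
--         moves = periodic_vectors
--     elif set_type == 'lattice':
--         # Allow both the vectors and their negatives.
--         moves = periodic_vectors + [(-p[0], -p[1]) for p in periodic_vectors]
--     else:
--         raise ValueError("set_type must be either 'semilinear' or 'lattice'")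
--
--     # Start from the base point if it's in the grid.
--     if 0 <= b[0] < max_val and 0 <= b[1] < max_val:
--         points.add(b)
--         q.append(b)
--
--     # Breadth-first search over the grid.
--     while q:
--         current = q.popleft()
--         for move in moves:
--             new_point = (current[0] + move[0], current[1] + move[1])
--             if (0 <= new_point[0] < max_val and 0 <= new_point[1] < max_val
--                     and new_point not in points):
--                 points.add(new_point)
--                 q.append(new_point)
--
--     return points
-- ===== SOURCE B (Python) =====
-- def compute_generated_set(b, periodic_vectors, max_val=30, set_type='semilinear'):
--     """Fixpoint saturation over whole sets: repeatedly take the in-grid image of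
--     the ENTIRE current set under the moves and union it in, stopping when the
--     set is closed under the moves.  No queue, no frontier, no visited test."""
--     if set_type == 'semilinear':
--         moves = periodic_vectors
--     elif set_type == 'lattice':
--         moves = periodic_vectors + [(-p[0], -p[1]) for p in periodic_vectors]
--     else:
--         raise ValueError("set_type must be either 'semilinear' or 'lattice'")
--
--     points = {b} if 0 <= b[0] < max_val and 0 <= b[1] < max_val else set()
--     while True:
--         neighbours = {(x + dx, y + dy) for (x, y) in points for (dx, dy) in moves
--                       if 0 <= x + dx < max_val and 0 <= y + dy < max_val}
--         if neighbours <= points: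
--             return points
--         points |= neighbours
-- ===== Notes on version B (the rewrite author's own statement) =====
-- stated objective: alternative
-- what changed: Replaces the deque BFS with its visited-set/enqueue bookkeeping by Kleene fixpoint iteration: each round recomputes the in-grid image of the entire current set under the moves and unions it in, stopping when the set is closed (image is a subset); no queue, no frontier, no per-point visited test.
import Mathlib
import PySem

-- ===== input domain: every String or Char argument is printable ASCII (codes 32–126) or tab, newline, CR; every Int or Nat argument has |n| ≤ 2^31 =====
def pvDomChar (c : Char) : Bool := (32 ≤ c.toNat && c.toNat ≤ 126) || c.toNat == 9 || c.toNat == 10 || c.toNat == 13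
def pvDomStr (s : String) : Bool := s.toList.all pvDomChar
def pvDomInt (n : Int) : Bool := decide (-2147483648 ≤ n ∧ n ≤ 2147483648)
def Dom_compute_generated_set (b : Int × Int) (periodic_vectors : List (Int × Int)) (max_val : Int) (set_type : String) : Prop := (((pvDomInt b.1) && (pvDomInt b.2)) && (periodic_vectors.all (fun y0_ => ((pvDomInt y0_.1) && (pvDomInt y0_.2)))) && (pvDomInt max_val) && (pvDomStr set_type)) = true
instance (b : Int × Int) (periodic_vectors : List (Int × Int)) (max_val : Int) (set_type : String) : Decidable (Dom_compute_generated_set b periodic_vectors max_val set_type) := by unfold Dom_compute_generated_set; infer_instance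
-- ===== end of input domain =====

-- B replaces A's deque BFS (visited set + worklist) by Kleene fixpoint iteration that
-- each round recomputes the in-grid image of the ENTIRE current set under the moves and
-- unions it in, stopping when the set is closed (objective: alternative); same return
-- value wherever A returns (both raise ValueError on a bad set_type, excluded by Pre_).

-- ===== PORT A =====
-- A's inner 'for move in moves' body over the state (points, queue)
def pvMoveFold (max_val : Int) (moves : List (Int × Int)) (c : Int × Int)
    (st : PySem.Set (Int × Int) × List (Int × Int)) : PySem.Set (Int × Int) × List (Int × Int) :=
  moves.foldl (fun st m =>
    if 0 ≤ c.1 + m.1 ∧ c.1 + m.1 < max_val ∧ 0 ≤ c.2 + m.2 ∧ c.2 + m.2 < max_val ∧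
        (c.1 + m.1, c.2 + m.2) ∉ st.1 then
      (PySem.Set.add st.1 (c.1 + m.1, c.2 + m.2), st.2 ++ [(c.1 + m.1, c.2 + m.2)])
    else st) st

-- A's 'while q' loop; fuel bounds the iteration count (pops = enqueues ≤ grid size,
-- proved sufficient below), it never changes the computed value
def pvAloop (max_val : Int) (moves : List (Int × Int)) :
    PySem.Set (Int × Int) → List (Int × Int) → Nat → List (Int × Int)
  | pts, [], _ => pts
  | pts, _ :: _, 0 => pts
  | pts, c :: q, fuel + 1 =>
    let st := pvMoveFold max_val moves c (pts, q)
    pvAloop max_val moves st.1 st.2 fuel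

def pvAfrom (b : Int × Int) (moves : List (Int × Int)) (max_val : Int) : List (Int × Int) :=
  if 0 ≤ b.1 ∧ b.1 < max_val ∧ 0 ≤ b.2 ∧ b.2 < max_val then
    pvAloop max_val moves (PySem.Set.add PySem.Set.empty b) [b] (max_val.toNat * max_val.toNat + 1)
  else
    pvAloop max_val moves PySem.Set.empty [] (max_val.toNat * max_val.toNat + 1)

def compute_generated_set (b : Int × Int) (periodic_vectors : List (Int × Int)) (max_val : Int) (set_type : String) : List (Int × Int) :=
  if set_type = "semilinear" then pvAfrom b periodic_vectors max_val
  else if set_type = "lattice" then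
    pvAfrom b (periodic_vectors ++ periodic_vectors.map (fun p => (-p.1, -p.2))) max_val
  else []  -- Python raises ValueError here; excluded by Pre_

-- ===== PORT B =====
-- the set comprehension: in-grid neighbours of every current point
def pvNbrList (max_val : Int) (moves : List (Int × Int)) (pts : List (Int × Int)) : List (Int × Int) :=
  pts.flatMap (fun c =>
    (moves.map (fun m => (c.1 + m.1, c.2 + m.2))).filter
      (fun p => decide (0 ≤ p.1 ∧ p.1 < max_val ∧ 0 ≤ p.2 ∧ p.2 < max_val)))

-- B's 'while True' loop; fuel bounds the number of rounds (each non-final round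
-- grows the set, proved sufficient below), it never changes the computed value
def pvSatLoop (max_val : Int) (moves : List (Int × Int)) :
    PySem.Set (Int × Int) → Nat → List (Int × Int)
  | pts, 0 => pts
  | pts, fuel + 1 =>
    let nb : PySem.Set (Int × Int) := PySem.Set.ofList (pvNbrList max_val moves pts)
    if PySem.Set.issubset nb pts then pts
    else pvSatLoop max_val moves (PySem.Set.union pts nb) fuel

def pvBfrom (b : Int × Int) (moves : List (Int × Int)) (max_val : Int) : List (Int × Int) :=
  let pts : PySem.Set (Int × Int) :=
    if 0 ≤ b.1 ∧ b.1 < max_val ∧ 0 ≤ b.2 ∧ b.2 < max_val then PySem.Set.ofList [b]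
    else PySem.Set.empty
  pvSatLoop max_val moves pts (max_val.toNat * max_val.toNat + 1)

def compute_generated_set_alt (b : Int × Int) (periodic_vectors : List (Int × Int)) (max_val : Int) (set_type : String) : List (Int × Int) :=
  if set_type = "semilinear" then pvBfrom b periodic_vectors max_val
  else if set_type = "lattice" then
    pvBfrom b (periodic_vectors ++ periodic_vectors.map (fun p => (-p.1, -p.2))) max_val
  else []  -- Python raises ValueError here; excluded by Pre_

-- ===== PRECONDITION & SPEC =====
-- Pre_ excludes exactly the set_type values on which A raises ValueError
def Pre_compute_generated_set (b : Int × Int) (periodic_vectors : List (Int × Int)) (max_val : Int) (set_type : String) : Prop :=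
  set_type = "semilinear" ∨ set_type = "lattice"
instance (b : Int × Int) (periodic_vectors : List (Int × Int)) (max_val : Int) (set_type : String) : Decidable (Pre_compute_generated_set b periodic_vectors max_val set_type) := by unfold Pre_compute_generated_set; infer_instance

def pvWitness_compute_generated_set : (Int × Int) × (List (Int × Int)) × Int × String :=
  ((0, 0), [(1, 2), (2, 1)], 5, "semilinear")

def Spec_compute_generated_set (b : Int × Int) (periodic_vectors : List (Int × Int)) (max_val : Int) (set_type : String) (out : List (Int × Int)) : Prop := out = compute_generated_set_alt b periodic_vectors max_val set_type
instance (b : Int × Int) (periodic_vectors : List (Int × Int)) (max_val : Int) (set_type : String) (out : List (Int × Int)) : Decidable (Spec_compute_generated_set b periodic_vectors max_val set_type out) := by unfold Spec_compute_generated_set; infer_instance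

-- ===== CLAIM (what is proved, stated in full; the proofs are below) =====
def Claim_equal_compute_generated_set : Prop := ∀ (b : Int × Int) (periodic_vectors : List (Int × Int)) (max_val : Int) (set_type : String), Dom_compute_generated_set b periodic_vectors max_val set_type → Pre_compute_generated_set b periodic_vectors max_val set_type → Spec_compute_generated_set b periodic_vectors max_val set_type (compute_generated_set b periodic_vectors max_val set_type)

-- ===== LEMMAS AND PROOFS =====

def pvInGrid (max_val : Int) (p : Int × Int) : Prop :=
  0 ≤ p.1 ∧ p.1 < max_val ∧ 0 ≤ p.2 ∧ p.2 < max_val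

-- one BFS frontier expansion, used only in the proofs to relate the two loops
def pvBround (max_val : Int) (moves : List (Int × Int)) (f : List (Int × Int))
    (pts : PySem.Set (Int × Int)) : PySem.Set (Int × Int) × List (Int × Int) :=
  f.foldl (fun st c => pvMoveFold max_val moves c st) (pts, [])

-- the move-fold only reads the point set; the appended list factors out of it
theorem pvMoveFold_acc (max_val : Int) (moves : List (Int × Int)) (c : Int × Int)
    (pts : PySem.Set (Int × Int)) (q : List (Int × Int)) :
    pvMoveFold max_val moves c (pts, q) =
      ((pvMoveFold max_val moves c (pts, [])).1,
        q ++ (pvMoveFold max_val moves c (pts, [])).2) := by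
  simp only [pvMoveFold]
  induction moves generalizing pts q with
  | nil => simp
  | cons m ms ih =>
    simp only [List.foldl_cons]
    by_cases h : 0 ≤ c.1 + m.1 ∧ c.1 + m.1 < max_val ∧ 0 ≤ c.2 + m.2 ∧ c.2 + m.2 < max_val ∧
        (c.1 + m.1, c.2 + m.2) ∉ pts
    · rw [if_pos h, if_pos h]
      simp only [List.nil_append]
      rw [ih (PySem.Set.add pts (c.1 + m.1, c.2 + m.2)) (q ++ [(c.1 + m.1, c.2 + m.2)]),
          ih (PySem.Set.add pts (c.1 + m.1, c.2 + m.2)) [(c.1 + m.1, c.2 + m.2)]]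
      simp
    · rw [if_neg h, if_neg h]
      exact ih pts q

-- one move-fold appends exactly its fresh in-grid points to the point set
theorem pvMoveFold_props (max_val : Int) (moves : List (Int × Int)) (c : Int × Int)
    (pts : PySem.Set (Int × Int)) (hnd : pts.Nodup) :
    ∃ t, pvMoveFold max_val moves c (pts, []) = (pts ++ t, t) ∧ (pts ++ t).Nodup ∧
      ∀ p ∈ t, pvInGrid max_val p := by
  induction moves generalizing pts with
  | nil => exact ⟨[], by simp [pvMoveFold], by simpa using hnd, by simp⟩
  | cons m ms ih =>
    by_cases h : 0 ≤ c.1 + m.1 ∧ c.1 + m.1 < max_val ∧ 0 ≤ c.2 + m.2 ∧ c.2 + m.2 < max_val ∧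
        (c.1 + m.1, c.2 + m.2) ∉ pts
    · have hadd : PySem.Set.add pts (c.1 + m.1, c.2 + m.2) = pts ++ [(c.1 + m.1, c.2 + m.2)] :=
        PySem.Set.add_of_not_mem h.2.2.2.2
      have hnd' : (pts ++ [(c.1 + m.1, c.2 + m.2)]).Nodup := by
        refine hnd.append (List.nodup_singleton _) ?_
        intro p hp hp'
        simp only [List.mem_singleton] at hp'
        exact h.2.2.2.2 (hp' ▸ hp)
      obtain ⟨t', heq, hnd'', hg⟩ := ih (pts ++ [(c.1 + m.1, c.2 + m.2)]) hnd'
      have hstep : pvMoveFold max_val (m :: ms) c (pts, []) =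
          pvMoveFold max_val ms c (pts ++ [(c.1 + m.1, c.2 + m.2)], [(c.1 + m.1, c.2 + m.2)]) := by
        simp only [pvMoveFold, List.foldl_cons]
        rw [if_pos h, hadd]
        simp only [List.nil_append]
      refine ⟨(c.1 + m.1, c.2 + m.2) :: t', ?_, by simpa using hnd'', ?_⟩
      · rw [hstep, pvMoveFold_acc, heq]
        simp
      · intro p hp
        rcases List.mem_cons.1 hp with hp | hp
        · exact hp ▸ ⟨h.1, h.2.1, h.2.2.1, h.2.2.2.1⟩
        · exact hg p hp
    · have hstep : pvMoveFold max_val (m :: ms) c (pts, []) = pvMoveFold max_val ms c (pts, []) := by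
        simp only [pvMoveFold, List.foldl_cons]
        rw [if_neg h]
      rw [hstep]
      exact ih pts hnd

-- the round fold only reads the point set; the next-frontier accumulator factors out
theorem pvBround_acc (max_val : Int) (moves : List (Int × Int)) (f : List (Int × Int))
    (pts : PySem.Set (Int × Int)) (q : List (Int × Int)) :
    f.foldl (fun st c => pvMoveFold max_val moves c st) (pts, q) =
      ((pvBround max_val moves f pts).1, q ++ (pvBround max_val moves f pts).2) := by
  induction f generalizing pts q with
  | nil => simp [pvBround]
  | cons c f' ih =>
    simp only [pvBround, List.foldl_cons]
    rw [pvMoveFold_acc max_val moves c pts q,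
        ih (pvMoveFold max_val moves c (pts, [])).1 (q ++ (pvMoveFold max_val moves c (pts, [])).2),
        show pvMoveFold max_val moves c (pts, []) =
          ((pvMoveFold max_val moves c (pts, [])).1, (pvMoveFold max_val moves c (pts, [])).2) from rfl,
        ih (pvMoveFold max_val moves c (pts, [])).1 (pvMoveFold max_val moves c (pts, [])).2]
    simp [List.append_assoc]

-- one round appends exactly its fresh in-grid points, and they are the next frontier
theorem pvBround_props (max_val : Int) (moves : List (Int × Int)) (f : List (Int × Int))
    (pts : PySem.Set (Int × Int)) (hnd : pts.Nodup) :
    ∃ t, pvBround max_val moves f pts = (pts ++ t, t) ∧ (pts ++ t).Nodup ∧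
      ∀ p ∈ t, pvInGrid max_val p := by
  induction f generalizing pts with
  | nil => exact ⟨[], by simp [pvBround], by simpa using hnd, by simp⟩
  | cons c f' ih =>
    obtain ⟨t1, h1, hnd1, hg1⟩ := pvMoveFold_props max_val moves c pts hnd
    obtain ⟨t2, h2, hnd2, hg2⟩ := ih (pts ++ t1) hnd1
    refine ⟨t1 ++ t2, ?_, by simpa [List.append_assoc] using hnd2, ?_⟩
    · simp only [pvBround, List.foldl_cons]
      rw [h1, pvBround_acc max_val moves f' (pts ++ t1) t1, h2]
      simp [List.append_assoc]
    · intro p hp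
      rcases List.mem_append.1 hp with hp | hp
      · exact hg1 p hp
      · exact hg2 p hp

-- BFS processes its queue exactly one frontier at a time
theorem pvAloop_sim (max_val : Int) (moves : List (Int × Int)) (f n : List (Int × Int))
    (pts : PySem.Set (Int × Int)) (fuel : Nat) :
    pvAloop max_val moves pts (f ++ n) (f.length + fuel) =
      pvAloop max_val moves (pvBround max_val moves f pts).1
        (n ++ (pvBround max_val moves f pts).2) fuel := by
  induction f generalizing pts n with
  | nil => simp [pvBround]
  | cons c f' ih =>
    have hlen : (c :: f').length + fuel = (f'.length + fuel) + 1 := by simp; omega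
    rw [hlen]
    show pvAloop max_val moves
        (pvMoveFold max_val moves c (pts, f' ++ n)).1
        (pvMoveFold max_val moves c (pts, f' ++ n)).2 (f'.length + fuel) = _
    rw [pvMoveFold_acc max_val moves c pts (f' ++ n)]
    dsimp only
    rw [List.append_assoc,
        ih (n ++ (pvMoveFold max_val moves c (pts, [])).2) (pvMoveFold max_val moves c (pts, [])).1]
    have hr : pvBround max_val moves (c :: f') pts =
        ((pvBround max_val moves f' (pvMoveFold max_val moves c (pts, [])).1).1,
          (pvMoveFold max_val moves c (pts, [])).2 ++
            (pvBround max_val moves f' (pvMoveFold max_val moves c (pts, [])).1).2) := by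
      simp only [pvBround, List.foldl_cons]
      rw [show pvMoveFold max_val moves c (pts, []) =
            ((pvMoveFold max_val moves c (pts, [])).1, (pvMoveFold max_val moves c (pts, [])).2)
          from rfl,
          pvBround_acc max_val moves f' (pvMoveFold max_val moves c (pts, [])).1
            (pvMoveFold max_val moves c (pts, [])).2]
      simp [pvBround]
    rw [hr]
    simp

-- a duplicate-free list of in-grid points has at most max_val² elements
theorem pvCard (max_val : Int) (l : List (Int × Int)) (h1 : l.Nodup)
    (h2 : ∀ p ∈ l, pvInGrid max_val p) :
    l.length ≤ max_val.toNat * max_val.toNat := by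
  have hsub : l ⊆ ((List.range max_val.toNat).map Int.ofNat) ×ˢ
      ((List.range max_val.toNat).map Int.ofNat) := by
    intro p hp
    obtain ⟨ha, hb, hc, hd⟩ := h2 p hp
    have hx : p.1 ∈ (List.range max_val.toNat).map Int.ofNat := by
      refine List.mem_map.2 ⟨p.1.toNat, List.mem_range.2 (by omega), ?_⟩
      simp [Int.ofNat_toNat]; omega
    have hy : p.2 ∈ (List.range max_val.toNat).map Int.ofNat := by
      refine List.mem_map.2 ⟨p.2.toNat, List.mem_range.2 (by omega), ?_⟩
      simp [Int.ofNat_toNat]; omega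
    have := List.mem_product.2 ⟨hx, hy⟩
    exact this
  have hlen := (h1.subperm hsub).length_le
  rw [List.length_product, List.length_map, List.length_range] at hlen
  exact hlen

-- updating with elements already present is the identity
theorem pvUpdate_of_subset (s : PySem.Set (Int × Int)) (xs : List (Int × Int))
    (h : ∀ x ∈ xs, x ∈ s) : PySem.Set.update s xs = s := by
  rw [PySem.Set.update_eq_append_filter]
  have : (PySem.Set.ofList xs).filter (fun y => !PySem.Set.contains s y) = [] := by
    rw [List.filter_eq_nil_iff]
    intro y hy
    have hys : y ∈ s := h y ((PySem.Set.mem_ofList xs y).1 hy)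
    simp only [Bool.not_eq_true', ← Bool.not_eq_true, PySem.Set.contains_iff]
    intro hc
    exact hc hys
  rw [this, List.append_nil]

-- deduplicating the added list first does not change the update
theorem pvUpdate_ofList (s : PySem.Set (Int × Int)) (xs : List (Int × Int)) :
    PySem.Set.update s (PySem.Set.ofList xs) = PySem.Set.update s xs := by
  rw [PySem.Set.update_eq_append_filter, PySem.Set.update_eq_append_filter,
      PySem.Set.ofList_ofList]

-- the set component of A's move-fold is a plain set-update by c's in-grid neighbours
theorem pvMoveFold_set (max_val : Int) (moves : List (Int × Int)) (c : Int × Int)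
    (pts : PySem.Set (Int × Int)) (q : List (Int × Int)) :
    (pvMoveFold max_val moves c (pts, q)).1 =
      PySem.Set.update pts
        ((moves.map (fun m => (c.1 + m.1, c.2 + m.2))).filter
          (fun p => decide (0 ≤ p.1 ∧ p.1 < max_val ∧ 0 ≤ p.2 ∧ p.2 < max_val))) := by
  induction moves generalizing pts q with
  | nil => simp [pvMoveFold, PySem.Set.update]
  | cons m ms ih =>
    have hstep : pvMoveFold max_val (m :: ms) c (pts, q) = pvMoveFold max_val ms c
        (if 0 ≤ c.1 + m.1 ∧ c.1 + m.1 < max_val ∧ 0 ≤ c.2 + m.2 ∧ c.2 + m.2 < max_val ∧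
            (c.1 + m.1, c.2 + m.2) ∉ pts then
          (PySem.Set.add pts (c.1 + m.1, c.2 + m.2), q ++ [(c.1 + m.1, c.2 + m.2)])
        else (pts, q)) := by
      simp only [pvMoveFold, List.foldl_cons]
    rw [hstep]
    simp only [List.map_cons, List.filter_cons]
    by_cases hg : 0 ≤ c.1 + m.1 ∧ c.1 + m.1 < max_val ∧ 0 ≤ c.2 + m.2 ∧ c.2 + m.2 < max_val
    · have hd : (decide (0 ≤ (c.1 + m.1, c.2 + m.2).1 ∧ (c.1 + m.1, c.2 + m.2).1 < max_val ∧
          0 ≤ (c.1 + m.1, c.2 + m.2).2 ∧ (c.1 + m.1, c.2 + m.2).2 < max_val)) = true := by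
        simp only [decide_eq_true_eq]; exact hg
      simp only [hd, if_true]
      by_cases hm : (c.1 + m.1, c.2 + m.2) ∈ pts
      · have hcond : ¬ (0 ≤ c.1 + m.1 ∧ c.1 + m.1 < max_val ∧ 0 ≤ c.2 + m.2 ∧
            c.2 + m.2 < max_val ∧ (c.1 + m.1, c.2 + m.2) ∉ pts) := by
          intro h; exact h.2.2.2.2 hm
        rw [if_neg hcond, ih pts q, PySem.Set.update_cons, PySem.Set.add_of_mem hm]
      · have hcond : 0 ≤ c.1 + m.1 ∧ c.1 + m.1 < max_val ∧ 0 ≤ c.2 + m.2 ∧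
            c.2 + m.2 < max_val ∧ (c.1 + m.1, c.2 + m.2) ∉ pts :=
          ⟨hg.1, hg.2.1, hg.2.2.1, hg.2.2.2, hm⟩
        rw [if_pos hcond, ih, PySem.Set.update_cons]
    · have hd : (decide (0 ≤ (c.1 + m.1, c.2 + m.2).1 ∧ (c.1 + m.1, c.2 + m.2).1 < max_val ∧
          0 ≤ (c.1 + m.1, c.2 + m.2).2 ∧ (c.1 + m.1, c.2 + m.2).2 < max_val)) = false := by
        simp only [decide_eq_false_iff_not]; exact hg
      have hcond : ¬ (0 ≤ c.1 + m.1 ∧ c.1 + m.1 < max_val ∧ 0 ≤ c.2 + m.2 ∧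
          c.2 + m.2 < max_val ∧ (c.1 + m.1, c.2 + m.2) ∉ pts) := by
        intro h; exact hg ⟨h.1, h.2.1, h.2.2.1, h.2.2.2.1⟩
      simp only [hd, Bool.false_eq_true, if_false]
      rw [if_neg hcond, ih pts q]

-- the set component of a BFS round is a set-update by the frontier's neighbour list
theorem pvBround_set (max_val : Int) (moves : List (Int × Int)) (f : List (Int × Int))
    (pts : PySem.Set (Int × Int)) :
    (pvBround max_val moves f pts).1 = PySem.Set.update pts (pvNbrList max_val moves f) := by
  induction f generalizing pts with
  | nil => simp [pvBround, pvNbrList, PySem.Set.update]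
  | cons c f' ih =>
    simp only [pvBround, List.foldl_cons, pvNbrList, List.flatMap_cons]
    rw [PySem.Set.update_append]
    rw [show pvMoveFold max_val moves c (pts, []) =
          ((pvMoveFold max_val moves c (pts, [])).1, (pvMoveFold max_val moves c (pts, [])).2)
        from rfl]
    have hb := pvBround_acc max_val moves f'
      (pvMoveFold max_val moves c (pts, [])).1 (pvMoveFold max_val moves c (pts, [])).2
    rw [hb]
    simp only [pvBround] at ih ⊢
    rw [ih (pvMoveFold max_val moves c (pts, [])).1, pvMoveFold_set max_val moves c pts []]
    simp [pvNbrList]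

-- main simulation: with sufficient fuel on both sides, BFS = fixpoint saturation
theorem pvMain (max_val : Int) (moves : List (Int × Int)) :
    ∀ (n : Nat) (P f : List (Int × Int)) (fa fs : Nat),
      (P ++ f).Nodup → (∀ p ∈ P ++ f, pvInGrid max_val p) →
      (∀ x ∈ pvNbrList max_val moves P, x ∈ P ++ f) →
      max_val.toNat * max_val.toNat ≤ (P ++ f).length + n →
      f.length + n ≤ fa → n < fs →
      pvAloop max_val moves (P ++ f) f fa = pvSatLoop max_val moves (P ++ f) fs := by
  intro n
  induction n using Nat.strong_induction_on with
  | _ n ih =>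
    intro P f fa fs hnd hg hcl hcap hfa hfs
    obtain ⟨fs', rfl⟩ : ∃ fs', fs = fs' + 1 := ⟨fs - 1, by omega⟩
    have hL : pvNbrList max_val moves (P ++ f) =
        pvNbrList max_val moves P ++ pvNbrList max_val moves f := by
      simp [pvNbrList]
    obtain ⟨t, hr, hnd', hgt⟩ := pvBround_props max_val moves f (P ++ f) hnd
    have hset : PySem.Set.update (P ++ f) (pvNbrList max_val moves f) = (P ++ f) ++ t := by
      have := pvBround_set max_val moves f (P ++ f)
      rw [hr] at this
      exact this.symm
    have hfull : PySem.Set.update (P ++ f) (pvNbrList max_val moves (P ++ f)) = (P ++ f) ++ t := by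
      rw [hL, PySem.Set.update_append, pvUpdate_of_subset (P ++ f) _ hcl, hset]
    match f, hr, hnd, hg, hcl, hcap, hfa, hnd', hgt, hset, hfull with
    | [], hr, hnd, hg, hcl, hcap, hfa, hnd', hgt, hset, hfull =>
      -- A's queue is empty: both sides return the current set
      have ht : t = [] := by
        simp only [pvNbrList, List.flatMap_nil, PySem.Set.update, List.foldl_nil,
          List.append_nil] at hset
        simpa using hset.symm
      subst ht
      have hsub : PySem.Set.issubset
          (PySem.Set.ofList (pvNbrList max_val moves (P ++ []))) (P ++ []) = true := by
        rw [PySem.Set.issubset_iff]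
        intro x hx
        have hx' := (PySem.Set.mem_ofList _ x).1 hx
        simp only [List.append_nil] at hx' ⊢
        have : x ∈ P ++ ([] : List (Int × Int)) := hcl x (by simpa [pvNbrList] using hx')
        simpa using this
      simp only [List.append_nil] at hsub ⊢
      simp [pvAloop, pvSatLoop, hsub]
    | c :: f', hr, hnd, hg, hcl, hcap, hfa, hnd', hgt, hset, hfull =>
      set pts := P ++ c :: f' with hpts
      have hfa1 : (c :: f').length ≤ fa := by simp only [List.length_cons] at hfa ⊢; omega
      have hA : pvAloop max_val moves pts (c :: f') fa =
          pvAloop max_val moves (pts ++ t) t (fa - (c :: f').length) := by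
        rw [show fa = (c :: f').length + (fa - (c :: f').length) by omega]
        have := pvAloop_sim max_val moves (c :: f') [] pts (fa - (c :: f').length)
        simp only [List.append_nil, List.nil_append] at this
        rw [this, hr]
        dsimp only
        rw [Nat.add_sub_cancel_left]
      rw [hA]
      match t, hr, hnd', hgt, hset, hfull with
      | [], hr, hnd', hgt, hset, hfull =>
        -- the round adds nothing: saturation's subset test succeeds and stops too
        have hsub : PySem.Set.issubset
            (PySem.Set.ofList (pvNbrList max_val moves pts)) pts = true := by
          rw [PySem.Set.issubset_iff]
          intro x hx
          have hx' := (PySem.Set.mem_ofList _ x).1 hx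
          have : x ∈ PySem.Set.update pts (pvNbrList max_val moves pts) :=
            (PySem.Set.mem_update pts _ x).2 (Or.inr hx')
          rw [hfull] at this
          simpa using this
        cases hfa' : fa - (c :: f').length <;>
          simp [pvAloop, pvSatLoop, hsub]
      | x :: t'', hr, hnd', hgt, hset, hfull =>
        -- the round adds x :: t'': saturation's subset test fails; both recurse
        have hxnot : x ∉ pts := by
          exact fun hx => (List.disjoint_of_nodup_append hnd') hx (by simp)
        have hxin : x ∈ pvNbrList max_val moves pts := by
          have hx : x ∈ PySem.Set.update pts (pvNbrList max_val moves pts) := by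
            rw [hfull]; simp
          rcases (PySem.Set.mem_update pts _ x).1 hx with h | h
          · exact absurd h hxnot
          · exact h
        have hsub : PySem.Set.issubset
            (PySem.Set.ofList (pvNbrList max_val moves pts)) pts = false := by
          rw [← Bool.not_eq_true, PySem.Set.issubset_iff]
          intro h
          exact hxnot (h x ((PySem.Set.mem_ofList _ x).2 hxin))
        have hunion : PySem.Set.union pts
            (PySem.Set.ofList (pvNbrList max_val moves pts)) = pts ++ x :: t'' := by
          show PySem.Set.update pts (PySem.Set.ofList (pvNbrList max_val moves pts)) = _
          rw [pvUpdate_ofList, hfull]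
        have hS : pvSatLoop max_val moves pts (fs' + 1) =
            pvSatLoop max_val moves (pts ++ x :: t'') fs' := by
          simp only [pvSatLoop, hsub, Bool.false_eq_true, if_false, hunion]
        rw [hS]
        have hgall : ∀ p ∈ pts ++ x :: t'', pvInGrid max_val p := by
          intro p hp
          rcases List.mem_append.1 hp with hp | hp
          exacts [hg p hp, hgt p hp]
        have hcl' : ∀ y ∈ pvNbrList max_val moves pts, y ∈ pts ++ x :: t'' := by
          intro y hy
          have : y ∈ PySem.Set.update pts (pvNbrList max_val moves pts) :=
            (PySem.Set.mem_update pts _ y).2 (Or.inr hy)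
          rwa [hfull] at this
        have hlen := pvCard max_val (pts ++ x :: t'') hnd' hgall
        have hlapp : (pts ++ x :: t'').length = pts.length + (t''.length + 1) := by
          simp [List.length_append]
        have hk1 : t''.length + 1 ≤ n := by
          rw [hlapp] at hlen
          omega
        exact ih (n - (t''.length + 1)) (by omega) pts (x :: t'')
          (fa - (c :: f').length) fs' hnd' hgall hcl'
          (by rw [hlapp]; omega)
          (by simp only [List.length_cons] at hfa ⊢; omega)
          (by omega)

-- A's run and B's run agree for every move set
theorem pvFrom_eq (b : Int × Int) (moves : List (Int × Int)) (max_val : Int) :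
    pvAfrom b moves max_val = pvBfrom b moves max_val := by
  unfold pvAfrom pvBfrom
  by_cases h : 0 ≤ b.1 ∧ b.1 < max_val ∧ 0 ≤ b.2 ∧ b.2 < max_val
  · simp only [if_pos h]
    have hseedA : PySem.Set.add PySem.Set.empty b = [b] := by
      simp [PySem.Set.add_of_not_mem, PySem.Set.empty]
    have hseedB : PySem.Set.ofList [b] = [b] := rfl
    rw [hseedA, hseedB]
    have hcap1 : 1 ≤ max_val.toNat * max_val.toNat := by
      have h1 : 1 ≤ max_val.toNat := by omega
      calc 1 = 1 * 1 := rfl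
        _ ≤ max_val.toNat * max_val.toNat := Nat.mul_le_mul h1 h1
    have := pvMain max_val moves (max_val.toNat * max_val.toNat - 1) [] [b]
      (max_val.toNat * max_val.toNat + 1) (max_val.toNat * max_val.toNat + 1)
      (by simp) (by intro p hp; simp only [List.nil_append, List.mem_singleton] at hp; exact hp ▸ h)
      (by intro x hx; simp [pvNbrList] at hx)
      (by simp; omega) (by simp; omega) (by omega)
    simpa using this
  · simp only [if_neg h]
    have hempty : pvSatLoop max_val moves PySem.Set.empty (max_val.toNat * max_val.toNat + 1) =
        PySem.Set.empty := rfl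
    rw [hempty]
    simp [pvAloop, PySem.Set.empty]

-- ===== VERDICT (by name: the statement is the Claim_ definition above) =====
theorem compute_generated_set_spec : Claim_equal_compute_generated_set := by
  intro b pv mv st hdom hpre
  unfold Spec_compute_generated_set compute_generated_set compute_generated_set_alt
  rcases hpre with h | h <;> subst h <;> simp [pvFrom_eq]
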